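-- pv_equiv track=rewrite | github.com/avinash-matrixgard/ghosthunter | src/ghosthunter/models/executor.py | _sanitize_untrusted
-- ===== SOURCE A (Python) =====
-- UNTRUSTED_OPEN = "<UNTRUSTED_COMMAND_OUTPUT>"
--
-- UNTRUSTED_CLOSE = "</UNTRUSTED_COMMAND_OUTPUT>"
--
-- def _sanitize_untrusted(output: str) -> str:
--     """Neutralize any envelope-tag lookalikes inside the untrusted block.
--
--     Without this, a paste that literally contained
--     ``</UNTRUSTED_COMMAND_OUTPUT>`` in its text could close our envelope
--     early and turn whatever followed into "system" content from Sonnet's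
--     perspective. We replace any such occurrence with a visually-similar
--     but non-active variant so the envelope structure is preserved.
--     """
--     if not output:
--         return output
--     # Replace both open and close tags (and lowercased variants, since
--     # Sonnet's matching is case-insensitive in practice). Zero-width-
--     # joiner between angle bracket and name breaks the literal match
--     # while staying human-readable.
--     for tag in (UNTRUSTED_OPEN, UNTRUSTED_CLOSE):
--         safe = tag.replace("<", "<\u200b").replace("</", "</\u200b")
--         output = output.replace(tag, safe)
--         output = output.replace(tag.lower(), safe.lower())
--     return output
-- ===== SOURCE B (Python) =====
-- UNTRUSTED_OPEN = "<UNTRUSTED_COMMAND_OUTPUT>"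
--
-- UNTRUSTED_CLOSE = "</UNTRUSTED_COMMAND_OUTPUT>"
--
-- # The four exact tag variants, in the order they are tried at each position,
-- # mapped to their neutralized forms (zero-width space after the leading '<';
-- # this is exactly what A's chain of replaces produces, since its '</'
-- # substitution can never fire after '<' was already broken).
-- _TAGS = (
--     UNTRUSTED_OPEN,
--     UNTRUSTED_CLOSE,
--     UNTRUSTED_OPEN.lower(),
--     UNTRUSTED_CLOSE.lower(),
-- )
-- _SAFE = {t: t[:1] + "\u200b" + t[1:] for t in _TAGS}
--
--
-- def _sanitize_untrusted(output: str) -> str: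
--     """Single left-to-right pass: at each position emit either the
--     neutralized form of the tag found there (skipping it) or the character."""
--     pieces = []
--     i = 0
--     n = len(output)
--     while i < n:
--         for tag in _TAGS:
--             if output.startswith(tag, i):
--                 pieces.append(_SAFE[tag])
--                 i += len(tag)
--                 break
--         else:
--             pieces.append(output[i])
--             i += 1
--     return "".join(pieces)
-- ===== Notes on version B (the rewrite author's own statement) =====
-- stated objective: alternative
-- what changed: Replaced A's four sequential full-string str.replace passes (open/close tag, original and lowercased) by a single left-to-right scan that consults a table mapping the four exact tag variants to their neutralized forms; the safe strings reproduce exactly what A's replace chain yields (its '</' substitution can never fire).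
import Mathlib
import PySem

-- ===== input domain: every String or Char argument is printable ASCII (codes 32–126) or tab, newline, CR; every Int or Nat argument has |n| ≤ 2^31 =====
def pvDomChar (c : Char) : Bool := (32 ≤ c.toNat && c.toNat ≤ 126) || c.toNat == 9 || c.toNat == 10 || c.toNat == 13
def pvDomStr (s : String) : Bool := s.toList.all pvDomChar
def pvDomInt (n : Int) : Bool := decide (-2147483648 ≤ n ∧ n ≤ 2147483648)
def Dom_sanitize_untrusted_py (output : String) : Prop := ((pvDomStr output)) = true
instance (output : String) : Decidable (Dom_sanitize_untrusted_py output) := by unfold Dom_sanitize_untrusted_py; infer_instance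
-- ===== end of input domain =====

-- B replaces A's four sequential full-string replace passes by ONE left-to-right scan
-- with a table of the four tag variants and their neutralized forms (objective: alternative).

-- ===== PORT A =====
-- A: four sequential str.replace passes, safe string computed from the tag
-- (the '</' substitution never fires, since '<' was already broken by the first replace).
def sanitize_untrusted_py (output : String) : String :=
  if output = "" then output
  else
    (["<UNTRUSTED_COMMAND_OUTPUT>", "</UNTRUSTED_COMMAND_OUTPUT>"] : List String).foldl
      (fun out tag =>
        let safe := PySem.Str.replace (PySem.Str.replace tag "<" "<\u200B") "</" "</\u200B"
        let out1 := PySem.Str.replace out tag safe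
        PySem.Str.replace out1 (PySem.Str.lower tag) (PySem.Str.lower safe))
      output

-- ===== PORT B =====
-- B (Source B): the four exact tag variants, in the order tried at each position, with their
-- neutralized forms (tag[:1] + zero-width space + tag[1:]); then ONE pass over the string,
-- at each position emitting either the table entry of the tag found there (skipping it)
-- or the single character.  The while/startswith/for-else loop of Source B is this recursion.
def pvTagsB : List String :=
  ["<UNTRUSTED_COMMAND_OUTPUT>", "</UNTRUSTED_COMMAND_OUTPUT>",
   PySem.Str.lower "<UNTRUSTED_COMMAND_OUTPUT>", PySem.Str.lower "</UNTRUSTED_COMMAND_OUTPUT>"]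

def pvSafeB : PySem.Dict String String :=
  pvTagsB.foldl
    (fun d t =>
      d.insert t (String.ofList
        (PySem.Chars.slice t.toList none (some 1) ++ "\u200B".toList ++ PySem.Chars.slice t.toList (some 1) none)))
    PySem.Dict.empty

-- length of a cons-list strictly shrinks under a positive drop (termination of the scan)
theorem pvDropLt (c : Char) (t : List Char) (n : Nat) (h : 0 < n) :
    ((c :: t).drop n).length < (c :: t).length := by
  simp only [List.length_drop, List.length_cons]; omega

-- the scan of Source B: at each position try the four tags in order (as the inner for-loop does)
def pvScanB (l : List Char) : List Char :=
  match l with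
  | [] => []
  | c :: t =>
    if ("<UNTRUSTED_COMMAND_OUTPUT>".toList).isPrefixOf (c :: t) then
      (pvSafeB.getD "<UNTRUSTED_COMMAND_OUTPUT>" "").toList ++ pvScanB ((c :: t).drop 26)
    else if ("</UNTRUSTED_COMMAND_OUTPUT>".toList).isPrefixOf (c :: t) then
      (pvSafeB.getD "</UNTRUSTED_COMMAND_OUTPUT>" "").toList ++ pvScanB ((c :: t).drop 27)
    else if ((PySem.Str.lower "<UNTRUSTED_COMMAND_OUTPUT>").toList).isPrefixOf (c :: t) then
      (pvSafeB.getD (PySem.Str.lower "<UNTRUSTED_COMMAND_OUTPUT>") "").toList ++ pvScanB ((c :: t).drop 26)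
    else if ((PySem.Str.lower "</UNTRUSTED_COMMAND_OUTPUT>").toList).isPrefixOf (c :: t) then
      (pvSafeB.getD (PySem.Str.lower "</UNTRUSTED_COMMAND_OUTPUT>") "").toList ++ pvScanB ((c :: t).drop 27)
    else c :: pvScanB t
termination_by l.length
decreasing_by
  · exact pvDropLt c t 26 (by omega)
  · exact pvDropLt c t 27 (by omega)
  · exact pvDropLt c t 26 (by omega)
  · exact pvDropLt c t 27 (by omega)
  · simp

def sanitize_untrusted_py_alt (output : String) : String :=
  String.ofList (pvScanB output.toList)

-- ===== PRECONDITION & SPEC =====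
def Spec_sanitize_untrusted_py (output : String) (out : String) : Prop := out = sanitize_untrusted_py_alt output
instance (output : String) (out : String) : Decidable (Spec_sanitize_untrusted_py output out) := by unfold Spec_sanitize_untrusted_py; infer_instance

-- ===== CLAIM (what is proved, stated in full; the proofs are below) =====
def Claim_equal_sanitize_untrusted_py : Prop := ∀ (output : String), Dom_sanitize_untrusted_py output → Spec_sanitize_untrusted_py output (sanitize_untrusted_py output)

-- ===== LEMMAS AND PROOFS =====

-- tag tails: each tag variant is '<' :: tail
def pvOt : List Char := "UNTRUSTED_COMMAND_OUTPUT>".toList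
def pvCt : List Char := "/UNTRUSTED_COMMAND_OUTPUT>".toList
def pvot : List Char := "untrusted_command_output>".toList
def pvct : List Char := "/untrusted_command_output>".toList
-- safe tails: each neutralized form is '<' :: tail (zero-width space first)
def pvSOt : List Char := "\u200BUNTRUSTED_COMMAND_OUTPUT>".toList
def pvSCt : List Char := "\u200B/UNTRUSTED_COMMAND_OUTPUT>".toList
def pvsot : List Char := "\u200Buntrusted_command_output>".toList
def pvsct : List Char := "\u200B/untrusted_command_output>".toList

-- reference form of CPython's str.replace with a non-empty pattern: leftmost scan
def pvRep (o0 : Char) (os new : List Char) : List Char → List Char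
  | [] => []
  | c :: t =>
    if (o0 :: os).isPrefixOf (c :: t) then new ++ pvRep o0 os new ((c :: t).drop (os.length + 1))
    else c :: pvRep o0 os new t
termination_by l => l.length
decreasing_by
  · exact pvDropLt c t (os.length + 1) (by omega)
  · simp

theorem pvGo_eq (o0 : Char) (os new : List Char) :
    ∀ (fuel : Nat) (l acc : List Char), l.length ≤ fuel →
      PySem.Chars.replace.go (o0 :: os) new fuel l acc = acc.reverse ++ pvRep o0 os new l := by
  intro fuel
  induction fuel with
  | zero =>
    intro l acc h
    have : l = [] := by cases l <;> simp_all
    subst this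
    rw [PySem.Chars.replace.go, pvRep]
  | succ n ih =>
    intro l acc h
    cases l with
    | nil => rw [PySem.Chars.replace.go, pvRep] <;> simp
    | cons c t =>
      rw [PySem.Chars.replace.go, pvRep]
      by_cases hp : (o0 :: os).isPrefixOf (c :: t)
      · simp only [hp, if_true]
        rw [ih _ _ (by simp at h ⊢; omega)]
        simp
      · simp only [hp, if_false, Bool.false_eq_true]
        rw [ih _ _ (by simp at h ⊢; omega)]
        simp

theorem pvReplace_eq (o0 : Char) (os new s : List Char) :
    PySem.Chars.replace s (o0 :: os) new = pvRep o0 os new s := by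
  rw [PySem.Chars.replace]
  simp only [List.isEmpty_cons, Bool.false_eq_true, if_false]
  rw [pvGo_eq o0 os new s.length s [] (le_refl _)]
  simp

theorem pvPrefixTake {p w v : List Char} (h : p <+: w ++ v) : p.take w.length <+: w := by
  obtain ⟨r, hr⟩ := h
  have hw : w = (p ++ r).take w.length := by
    rw [hr]; simp
  rw [List.take_append] at hw
  exact ⟨_, hw.symm⟩

def pvSkipOKb (u p : List Char) : Bool :=
  (List.range u.length).all (fun i => !((p.take (u.length - i)).isPrefixOf (u.drop i)))

theorem pvRep_skip (o0 : Char) (os r : List Char) (u : List Char) :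
    ∀ (v : List Char), (∀ i, i < u.length → ¬ ((o0 :: os) <+: (u.drop i ++ v))) →
      pvRep o0 os r (u ++ v) = u ++ pvRep o0 os r v := by
  induction u with
  | nil => intro v _; simp
  | cons a u' ih =>
    intro v h
    have h0 : ¬ ((o0 :: os) <+: (a :: (u' ++ v))) := by
      have := h 0 (by simp); simpa using this
    rw [List.cons_append, pvRep]
    have hb : (o0 :: os).isPrefixOf (a :: (u' ++ v)) = false := by
      rw [← Bool.not_eq_true, List.isPrefixOf_iff_prefix]; exact h0
    simp only [hb, Bool.false_eq_true, if_false]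
    rw [ih v (fun i hi => by have := h (i+1) (by simp; omega); simpa using this)]
    simp

theorem pvRep_skipOK (o0 : Char) (os r u v : List Char) (h : pvSkipOKb u (o0 :: os) = true) :
    pvRep o0 os r (u ++ v) = u ++ pvRep o0 os r v := by
  apply pvRep_skip
  intro i hi hp
  have hT : (o0 :: os).take (u.length - i) <+: u.drop i := by
    have := pvPrefixTake (w := u.drop i) (v := v) (by simpa using hp)
    simpa [List.length_drop] using this
  have := List.all_eq_true.mp h (i) (by simp [List.mem_range]; omega)
  simp only [Bool.not_eq_eq_eq_not, Bool.not_true] at this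
  rw [← List.isPrefixOf_iff_prefix] at hT
  simp [hT] at this

theorem pvRep_match (o0 : Char) (os r : List Char) {s : List Char} (h : (o0 :: os) <+: s) :
    pvRep o0 os r s = r ++ pvRep o0 os r (s.drop (os.length + 1)) := by
  cases s with
  | nil => exact absurd (List.eq_nil_of_prefix_nil h) (by simp)
  | cons c t =>
    rw [pvRep]
    have hb : (o0 :: os).isPrefixOf (c :: t) = true := List.isPrefixOf_iff_prefix.mpr h
    simp [hb]

theorem pvRep_tailfree (os rs : List Char) :
    ∀ (n : Nat) (X : List Char), X.length ≤ n → ∀ (q : List Char), '<' ∉ q →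
      (q <+: pvRep '<' os ('<' :: rs) X ↔ q <+: X) := by
  intro n
  induction n with
  | zero =>
    intro X hX q hq
    have : X = [] := by cases X <;> simp_all
    subst this; rw [pvRep]
  | succ n ih =>
    intro X hX q hq
    cases X with
    | nil => rw [pvRep]
    | cons c t =>
      rw [pvRep]
      by_cases hp : ('<' :: os) <+: (c :: t)
      · have hb : ('<' :: os).isPrefixOf (c :: t) = true := List.isPrefixOf_iff_prefix.mpr hp
        simp only [hb, if_true]
        cases q with
        | nil => simp
        | cons a q' =>
          constructor
          · intro hpre
            rw [List.cons_append, List.cons_prefix_cons] at hpre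
            exact (hq (by rw [hpre.1]; exact List.mem_cons_self)).elim
          · intro hpre
            rw [List.cons_prefix_cons] at hpre
            have hc : c = '<' := ((List.cons_prefix_cons).mp hp).1.symm
            exact (hq (by rw [hpre.1.trans hc]; exact List.mem_cons_self)).elim
      · have hb : ('<' :: os).isPrefixOf (c :: t) = false := by
          rw [← Bool.not_eq_true, List.isPrefixOf_iff_prefix]; exact hp
        simp only [hb, Bool.false_eq_true, if_false]
        cases q with
        | nil => simp
        | cons a q' =>
          rw [List.cons_prefix_cons, List.cons_prefix_cons]
          have := ih t (by simp at hX; omega) q' (fun hmem => hq (List.mem_cons_of_mem _ hmem))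
          rw [this]

theorem pvRep_nomatch (os rs qs : List Char) (hq : '<' ∉ qs)
    (hqr : (('<' :: qs).take (rs.length + 1)).isPrefixOf ('<' :: rs) = false)
    (s : List Char) (hs : ¬ ('<' :: qs) <+: s) :
    ¬ ('<' :: qs) <+: pvRep '<' os ('<' :: rs) s := by
  cases s with
  | nil => rw [pvRep]; exact hs
  | cons c t =>
    rw [pvRep]
    by_cases hp : ('<' :: os) <+: (c :: t)
    · have hb : ('<' :: os).isPrefixOf (c :: t) = true := List.isPrefixOf_iff_prefix.mpr hp
      simp only [hb, if_true]
      intro hpre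
      have : (('<' :: qs).take ('<' :: rs).length) <+: ('<' :: rs) := pvPrefixTake hpre
      rw [← List.isPrefixOf_iff_prefix] at this
      simp only [List.length_cons] at this
      rw [this] at hqr; exact absurd hqr (by simp)
    · have hb : ('<' :: os).isPrefixOf (c :: t) = false := by
        rw [← Bool.not_eq_true, List.isPrefixOf_iff_prefix]; exact hp
      simp only [hb, Bool.false_eq_true, if_false]
      intro hpre
      rw [List.cons_prefix_cons] at hpre
      have : qs <+: t := (pvRep_tailfree os rs t.length t (le_refl _) qs hq).mp hpre.2
      exact hs (by rw [List.cons_prefix_cons]; exact ⟨hpre.1, this⟩)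


-- the heart: A's four sequential replaces equal B's single scan, on char lists
theorem pvMain (s : List Char) :
    pvRep '<' pvct ('<' :: pvsct)
      (pvRep '<' pvCt ('<' :: pvSCt)
        (pvRep '<' pvot ('<' :: pvsot)
          (pvRep '<' pvOt ('<' :: pvSOt) s))) = pvScanB s := by
  induction s using pvScanB.induct with
  | case1 => simp [pvRep, pvScanB]
  | case2 c t hO ih =>
    -- the open tag matches here
    have hO' : ('<' :: pvOt) <+: (c :: t) := List.isPrefixOf_iff_prefix.mp hO
    obtain ⟨v, hv⟩ := hO'
    have hdrop : (c :: t).drop 26 = v := by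
      rw [← hv]
      have h26 : (('<' : Char) :: pvOt).length = 26 := by decide
      rw [← h26]; exact List.drop_left
    rw [hdrop] at ih
    conv_rhs => rw [pvScanB]
    simp only [hO, if_true, hdrop]
    have gO : (pvSafeB.getD "<UNTRUSTED_COMMAND_OUTPUT>" "").toList = '<' :: pvSOt := by decide
    rw [gO, ← ih, ← hv]
    rw [pvRep_match '<' pvOt ('<' :: pvSOt) (List.prefix_append _ _)]
    have h26 : pvOt.length + 1 = (('<' : Char) :: pvOt).length := by simp
    rw [h26, List.drop_left]
    rw [pvRep_skipOK '<' pvot ('<' :: pvsot) ('<' :: pvSOt) _ (by decide)]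
    rw [pvRep_skipOK '<' pvCt ('<' :: pvSCt) ('<' :: pvSOt) _ (by decide)]
    rw [pvRep_skipOK '<' pvct ('<' :: pvsct) ('<' :: pvSOt) _ (by decide)]
  | case3 c t hO hC ih =>
    -- the close tag matches here
    have hC' : ('<' :: pvCt) <+: (c :: t) := List.isPrefixOf_iff_prefix.mp hC
    obtain ⟨v, hv⟩ := hC'
    have hdrop : (c :: t).drop 27 = v := by
      rw [← hv]
      have h27 : (('<' : Char) :: pvCt).length = 27 := by decide
      rw [← h27]; exact List.drop_left
    rw [hdrop] at ih
    conv_rhs => rw [pvScanB]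
    simp only [Bool.not_eq_true] at hO
    simp only [hO, hC, Bool.false_eq_true, if_false, if_true, hdrop]
    have gC : (pvSafeB.getD "</UNTRUSTED_COMMAND_OUTPUT>" "").toList = '<' :: pvSCt := by decide
    rw [gC, ← ih, ← hv]
    rw [pvRep_skipOK '<' pvOt ('<' :: pvSOt) ('<' :: pvCt) _ (by decide)]
    rw [pvRep_skipOK '<' pvot ('<' :: pvsot) ('<' :: pvCt) _ (by decide)]
    rw [pvRep_match '<' pvCt ('<' :: pvSCt) (List.prefix_append _ _)]
    have h27 : pvCt.length + 1 = (('<' : Char) :: pvCt).length := by simp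
    rw [h27, List.drop_left]
    rw [pvRep_skipOK '<' pvct ('<' :: pvsct) ('<' :: pvSCt) _ (by decide)]
  | case4 c t hO hC ho ih =>
    -- the lowercase open tag matches here
    have ho'' : ((PySem.Str.lower "<UNTRUSTED_COMMAND_OUTPUT>").toList) = '<' :: pvot := by decide
    have ho' : ('<' :: pvot) <+: (c :: t) := List.isPrefixOf_iff_prefix.mp (ho'' ▸ ho)
    obtain ⟨v, hv⟩ := ho'
    have hdrop : (c :: t).drop 26 = v := by
      rw [← hv]
      have h26 : (('<' : Char) :: pvot).length = 26 := by decide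
      rw [← h26]; exact List.drop_left
    rw [hdrop] at ih
    conv_rhs => rw [pvScanB]
    simp only [Bool.not_eq_true] at hO hC
    simp only [hO, hC, ho, Bool.false_eq_true, if_false, if_true, hdrop]
    have go : (pvSafeB.getD (PySem.Str.lower "<UNTRUSTED_COMMAND_OUTPUT>") "").toList = '<' :: pvsot := by decide
    rw [go, ← ih, ← hv]
    rw [pvRep_skipOK '<' pvOt ('<' :: pvSOt) ('<' :: pvot) _ (by decide)]
    rw [pvRep_match '<' pvot ('<' :: pvsot) (List.prefix_append _ _)]
    have h26 : pvot.length + 1 = (('<' : Char) :: pvot).length := by simp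
    rw [h26, List.drop_left]
    rw [pvRep_skipOK '<' pvCt ('<' :: pvSCt) ('<' :: pvsot) _ (by decide)]
    rw [pvRep_skipOK '<' pvct ('<' :: pvsct) ('<' :: pvsot) _ (by decide)]
  | case5 c t hO hC ho hc ih =>
    -- the lowercase close tag matches here
    have hc'' : ((PySem.Str.lower "</UNTRUSTED_COMMAND_OUTPUT>").toList) = '<' :: pvct := by decide
    have hc' : ('<' :: pvct) <+: (c :: t) := List.isPrefixOf_iff_prefix.mp (hc'' ▸ hc)
    obtain ⟨v, hv⟩ := hc'
    have hdrop : (c :: t).drop 27 = v := by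
      rw [← hv]
      have h27 : (('<' : Char) :: pvct).length = 27 := by decide
      rw [← h27]; exact List.drop_left
    rw [hdrop] at ih
    conv_rhs => rw [pvScanB]
    simp only [Bool.not_eq_true] at hO hC ho
    simp only [hO, hC, ho, hc, Bool.false_eq_true, if_false, if_true, hdrop]
    have gc : (pvSafeB.getD (PySem.Str.lower "</UNTRUSTED_COMMAND_OUTPUT>") "").toList = '<' :: pvsct := by decide
    rw [gc, ← ih, ← hv]
    rw [pvRep_skipOK '<' pvOt ('<' :: pvSOt) ('<' :: pvct) _ (by decide)]
    rw [pvRep_skipOK '<' pvot ('<' :: pvsot) ('<' :: pvct) _ (by decide)]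
    rw [pvRep_skipOK '<' pvCt ('<' :: pvSCt) ('<' :: pvct) _ (by decide)]
    rw [pvRep_match '<' pvct ('<' :: pvsct) (List.prefix_append _ _)]
    have h27 : pvct.length + 1 = (('<' : Char) :: pvct).length := by simp
    rw [h27, List.drop_left]
  | case6 c t hO hC ho hc ih =>
    -- no tag matches here: all four replaces keep the head character
    have ho'' : ((PySem.Str.lower "<UNTRUSTED_COMMAND_OUTPUT>").toList) = '<' :: pvot := by decide
    have hc'' : ((PySem.Str.lower "</UNTRUSTED_COMMAND_OUTPUT>").toList) = '<' :: pvct := by decide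
    have nO : ¬ ('<' :: pvOt) <+: (c :: t) := fun hp => hO (List.isPrefixOf_iff_prefix.mpr hp)
    have nC : ¬ ('<' :: pvCt) <+: (c :: t) := fun hp => hC (List.isPrefixOf_iff_prefix.mpr hp)
    have no : ¬ ('<' :: pvot) <+: (c :: t) := fun hp => ho (by rw [ho'']; exact List.isPrefixOf_iff_prefix.mpr hp)
    have nc : ¬ ('<' :: pvct) <+: (c :: t) := fun hp => hc (by rw [hc'']; exact List.isPrefixOf_iff_prefix.mpr hp)
    -- step 1: the open-tag replace keeps the head
    have e1 : pvRep '<' pvOt ('<' :: pvSOt) (c :: t) = c :: pvRep '<' pvOt ('<' :: pvSOt) t := by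
      rw [pvRep]
      have hb : ('<' :: pvOt).isPrefixOf (c :: t) = false := by
        rw [← Bool.not_eq_true, List.isPrefixOf_iff_prefix]; exact nO
      simp [hb]
    -- no later tag appears at the front of the intermediate strings
    have n2 : ¬ ('<' :: pvot) <+: pvRep '<' pvOt ('<' :: pvSOt) (c :: t) :=
      pvRep_nomatch pvOt pvSOt pvot (by decide) (by decide) _ no
    have n3a : ¬ ('<' :: pvCt) <+: pvRep '<' pvOt ('<' :: pvSOt) (c :: t) :=
      pvRep_nomatch pvOt pvSOt pvCt (by decide) (by decide) _ nC
    have n3 : ¬ ('<' :: pvCt) <+: pvRep '<' pvot ('<' :: pvsot) (pvRep '<' pvOt ('<' :: pvSOt) (c :: t)) :=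
      pvRep_nomatch pvot pvsot pvCt (by decide) (by decide) _ n3a
    have n4a : ¬ ('<' :: pvct) <+: pvRep '<' pvOt ('<' :: pvSOt) (c :: t) :=
      pvRep_nomatch pvOt pvSOt pvct (by decide) (by decide) _ nc
    have n4b : ¬ ('<' :: pvct) <+: pvRep '<' pvot ('<' :: pvsot) (pvRep '<' pvOt ('<' :: pvSOt) (c :: t)) :=
      pvRep_nomatch pvot pvsot pvct (by decide) (by decide) _ n4a
    have n4 : ¬ ('<' :: pvct) <+: pvRep '<' pvCt ('<' :: pvSCt) (pvRep '<' pvot ('<' :: pvsot) (pvRep '<' pvOt ('<' :: pvSOt) (c :: t))) :=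
      pvRep_nomatch pvCt pvSCt pvct (by decide) (by decide) _ n4b
    -- step 2-4: the remaining replaces keep the head as well
    rw [e1] at n2 n3 n4
    have e2 : pvRep '<' pvot ('<' :: pvsot) (c :: pvRep '<' pvOt ('<' :: pvSOt) t)
        = c :: pvRep '<' pvot ('<' :: pvsot) (pvRep '<' pvOt ('<' :: pvSOt) t) := by
      rw [pvRep]
      have hb : ('<' :: pvot).isPrefixOf (c :: pvRep '<' pvOt ('<' :: pvSOt) t) = false := by
        rw [← Bool.not_eq_true, List.isPrefixOf_iff_prefix]; exact n2
      simp [hb]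
    rw [e2] at n3 n4
    have e3 : pvRep '<' pvCt ('<' :: pvSCt) (c :: pvRep '<' pvot ('<' :: pvsot) (pvRep '<' pvOt ('<' :: pvSOt) t))
        = c :: pvRep '<' pvCt ('<' :: pvSCt) (pvRep '<' pvot ('<' :: pvsot) (pvRep '<' pvOt ('<' :: pvSOt) t)) := by
      rw [pvRep]
      have hb : ('<' :: pvCt).isPrefixOf (c :: pvRep '<' pvot ('<' :: pvsot) (pvRep '<' pvOt ('<' :: pvSOt) t)) = false := by
        rw [← Bool.not_eq_true, List.isPrefixOf_iff_prefix]; exact n3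
      simp [hb]
    rw [e3] at n4
    have e4 : pvRep '<' pvct ('<' :: pvsct) (c :: pvRep '<' pvCt ('<' :: pvSCt) (pvRep '<' pvot ('<' :: pvsot) (pvRep '<' pvOt ('<' :: pvSOt) t)))
        = c :: pvRep '<' pvct ('<' :: pvsct) (pvRep '<' pvCt ('<' :: pvSCt) (pvRep '<' pvot ('<' :: pvsot) (pvRep '<' pvOt ('<' :: pvSOt) t))) := by
      rw [pvRep]
      have hb : ('<' :: pvct).isPrefixOf (c :: pvRep '<' pvCt ('<' :: pvSCt) (pvRep '<' pvot ('<' :: pvsot) (pvRep '<' pvOt ('<' :: pvSOt) t))) = false := by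
        rw [← Bool.not_eq_true, List.isPrefixOf_iff_prefix]; exact n4
      simp [hb]
    rw [e1, e2, e3, e4, ih]
    conv_rhs => rw [pvScanB]
    simp only [Bool.not_eq_true] at hO hC ho hc
    simp only [hO, hC, ho, hc, Bool.false_eq_true, if_false]

-- string-level form of a single replace pass
theorem pvStrRep (s : String) (o0 : Char) (os new : List Char) (old nw : String)
    (h1 : old.toList = o0 :: os) (h2 : nw.toList = new) :
    PySem.Str.replace s old nw = String.ofList (pvRep o0 os new s.toList) := by
  rw [PySem.Str.replace, h1, h2, pvReplace_eq]

-- ===== VERDICT (by name: the statement is the Claim_ definition above) =====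
theorem sanitize_untrusted_py_spec : Claim_equal_sanitize_untrusted_py := by
  intro output _
  unfold Spec_sanitize_untrusted_py sanitize_untrusted_py sanitize_untrusted_py_alt
  by_cases h : output = ""
  · subst h
    rw [if_pos rfl, show ("" : String).toList = [] from rfl, pvScanB]
  · rw [if_neg h]
    simp only [List.foldl]
    -- evaluate the closed-form safe strings and lowercasings of A
    rw [show PySem.Str.replace (PySem.Str.replace "<UNTRUSTED_COMMAND_OUTPUT>" "<" "<\u200B") "</" "</\u200B" = "<\u200BUNTRUSTED_COMMAND_OUTPUT>" from by decide]
    rw [show PySem.Str.replace (PySem.Str.replace "</UNTRUSTED_COMMAND_OUTPUT>" "<" "<\u200B") "</" "</\u200B" = "<\u200B/UNTRUSTED_COMMAND_OUTPUT>" from by decide]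
    rw [show PySem.Str.lower "<UNTRUSTED_COMMAND_OUTPUT>" = "<untrusted_command_output>" from by decide]
    rw [show PySem.Str.lower "</UNTRUSTED_COMMAND_OUTPUT>" = "</untrusted_command_output>" from by decide]
    rw [show PySem.Str.lower "<\u200BUNTRUSTED_COMMAND_OUTPUT>" = "<\u200Buntrusted_command_output>" from by decide]
    rw [show PySem.Str.lower "<\u200B/UNTRUSTED_COMMAND_OUTPUT>" = "<\u200B/untrusted_command_output>" from by decide]
    -- turn the four replace passes into pvRep scans
    rw [pvStrRep _ '<' pvOt ('<' :: pvSOt) "<UNTRUSTED_COMMAND_OUTPUT>" "<\u200BUNTRUSTED_COMMAND_OUTPUT>" (by decide) (by decide)]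
    rw [pvStrRep _ '<' pvot ('<' :: pvsot) "<untrusted_command_output>" "<\u200Buntrusted_command_output>" (by decide) (by decide)]
    rw [pvStrRep _ '<' pvCt ('<' :: pvSCt) "</UNTRUSTED_COMMAND_OUTPUT>" "<\u200B/UNTRUSTED_COMMAND_OUTPUT>" (by decide) (by decide)]
    rw [pvStrRep _ '<' pvct ('<' :: pvsct) "</untrusted_command_output>" "<\u200B/untrusted_command_output>" (by decide) (by decide)]
    simp only [String.toList_ofList]
    exact congrArg String.ofList (pvMain output.toList)
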